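-- pv_equiv track=rewrite | github.com/vermont42/Konjugieren | scripts/generate_verb_pdf.py | mixed_case_to_xml
-- ===== SOURCE A (Python) =====
-- COLOR_BLACK = "#000000"
--
-- COLOR_DARK_RED = "#BF0000"
--
-- def escape_xml(text: str) -> str:
--     """Escape XML special characters."""
--     return text.replace("&", "&amp;").replace("<", "&lt;").replace(">", "&gt;")
--
-- def is_formal_sie_start(chars: list[str], index: int) -> bool:
--     """Check if position is the start of formal 'Sie'."""
--     if index + 2 >= len(chars):
--         return False
--     if chars[index] != "S" or chars[index + 1] != "i" or chars[index + 2] != "e":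
--         return False
--     if index > 0 and chars[index - 1] != " ":
--         return False
--     if index + 3 < len(chars) and chars[index + 3].isalpha():
--         return False
--     return True
--
-- def mixed_case_to_xml(text: str) -> str:
--     """Convert mixed-case string to colored XML for reportlab.
--
--     Lowercase/non-letter → black (output lowercased)
--     Uppercase → dark red (output lowercased)
--     Special: 'Sie' at word boundary → always black, preserve case
--     """
--     chars = list(text)
--     result = []
--     current_regular = []
--     current_irregular = []
--     in_irregular = False
--
--     def flush_regular():
--         if current_regular:
--             result.append(
--                 f'<font color="{COLOR_BLACK}">{"".join(current_regular)}</font>'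
--             )
--             current_regular.clear()
--
--     def flush_irregular():
--         if current_irregular:
--             result.append(
--                 f'<font color="{COLOR_DARK_RED}">{"".join(current_irregular)}</font>'
--             )
--             current_irregular.clear()
--
--     for i, char in enumerate(chars):
--         part_of_sie = (
--             is_formal_sie_start(chars, i)
--             or (i > 0 and is_formal_sie_start(chars, i - 1))
--             or (i > 1 and is_formal_sie_start(chars, i - 2))
--         )
--         is_regular = char.islower() or not char.isalpha() or part_of_sie
--         canonical = char if part_of_sie else char.lower()
--         # Escape XML entities
--         canonical = escape_xml(canonical)
--
--         if is_regular:
--             if in_irregular: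
--                 flush_irregular()
--                 in_irregular = False
--             current_regular.append(canonical)
--         else:
--             if not in_irregular:
--                 flush_regular()
--                 in_irregular = True
--             current_irregular.append(canonical)
--
--     flush_regular()
--     flush_irregular()
--
--     return "".join(result)
-- ===== SOURCE B (Python) =====
-- COLOR_BLACK = "#000000"
--
-- COLOR_DARK_RED = "#BF0000"
--
-- def escape_xml(text: str) -> str:
--     """Escape XML special characters."""
--     return text.replace("&", "&amp;").replace("<", "&lt;").replace(">", "&gt;")
--
-- def is_formal_sie_start(chars: list[str], index: int) -> bool:
--     """Check if position is the start of formal 'Sie'."""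
--     if index + 2 >= len(chars):
--         return False
--     if chars[index] != "S" or chars[index + 1] != "i" or chars[index + 2] != "e":
--         return False
--     if index > 0 and chars[index - 1] != " ":
--         return False
--     if index + 3 < len(chars) and chars[index + 3].isalpha():
--         return False
--     return True
--
-- def _classify(chars: list[str]) -> list[tuple[str, bool]]:
--     """Phase 1: per character, the escaped canonical text and whether it is regular (black)."""
--     pairs = []
--     for i, char in enumerate(chars):
--         part_of_sie = (
--             is_formal_sie_start(chars, i)
--             or (i > 0 and is_formal_sie_start(chars, i - 1))
--             or (i > 1 and is_formal_sie_start(chars, i - 2))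
--         )
--         is_regular = char.islower() or not char.isalpha() or part_of_sie
--         canonical = escape_xml(char if part_of_sie else char.lower())
--         pairs.append((canonical, is_regular))
--     return pairs
--
-- def mixed_case_to_xml(text: str) -> str:
--     """Phase 2: coalesce maximal runs of equal flag and wrap each run in a font span."""
--     pairs = _classify(list(text))
--     spans = []
--     i = 0
--     n = len(pairs)
--     while i < n:
--         flag = pairs[i][1]
--         j = i
--         while j < n and pairs[j][1] == flag:
--             j += 1
--         body = "".join(c for c, _ in pairs[i:j])
--         color = COLOR_BLACK if flag else COLOR_DARK_RED
--         spans.append(f'<font color="{color}">{body}</font>')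
--         i = j
--     return "".join(spans)
-- ===== Notes on version B (the rewrite author's own statement) =====
-- stated objective: alternative
-- what changed: B replaces A's streaming state machine (in_irregular flag, two pending buffers, manual flush helpers) by a two-phase classify-then-group decomposition: one pass builds (escaped canonical, is_regular) pairs, then maximal runs of equal flag are coalesced by a two-pointer scan and each run rendered as one font span.
import Mathlib
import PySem

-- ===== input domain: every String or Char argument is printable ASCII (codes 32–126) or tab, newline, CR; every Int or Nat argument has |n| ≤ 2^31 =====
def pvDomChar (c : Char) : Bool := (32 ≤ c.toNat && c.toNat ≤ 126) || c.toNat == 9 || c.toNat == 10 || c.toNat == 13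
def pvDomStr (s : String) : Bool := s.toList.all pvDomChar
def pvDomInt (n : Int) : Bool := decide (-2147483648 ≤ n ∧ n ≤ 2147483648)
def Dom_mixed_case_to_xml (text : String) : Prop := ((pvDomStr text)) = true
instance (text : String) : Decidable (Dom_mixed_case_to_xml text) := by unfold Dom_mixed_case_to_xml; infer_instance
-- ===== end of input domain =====

-- B replaces A's streaming flag/buffer state machine by a classify-then-group decomposition (objective: alternative, same cost).

-- ===== PORT A =====
-- module constants
def COLOR_BLACK : List Char := "#000000".toList
def COLOR_DARK_RED : List Char := "#BF0000".toList

-- shared module helper escape_xml (both Pythons have it verbatim)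
def escape_xml (t : List Char) : List Char :=
  PySem.Chars.replace (PySem.Chars.replace (PySem.Chars.replace t "&".toList "&amp;".toList)
    "<".toList "&lt;".toList) ">".toList "&gt;".toList

-- shared module helper is_formal_sie_start (both Pythons have it verbatim);
-- list indexing via pyGetD: every access is guarded in range by the preceding ifs, as in the Python
def is_formal_sie_start (chars : List Char) (index : Int) : Bool :=
  if (chars.length : Int) ≤ index + 2 then false
  else if PySem.List.pyGetD chars index ' ' ≠ 'S' ∨ PySem.List.pyGetD chars (index + 1) ' ' ≠ 'i'
          ∨ PySem.List.pyGetD chars (index + 2) ' ' ≠ 'e' then false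
  else if 0 < index ∧ PySem.List.pyGetD chars (index - 1) ' ' ≠ ' ' then false
  else if index + 3 < (chars.length : Int) ∧ PySem.Chars.isalpha (PySem.List.pyGetD chars (index + 3) ' ') then false
  else true

-- the f-string '<font color="{color}">{body}</font>'
def pvFontSpan (color : List Char) (body : List Char) : List Char :=
  "<font color=\"".toList ++ color ++ "\">".toList ++ body ++ "</font>".toList

-- A's nested flush_regular / flush_irregular (append span iff buffer nonempty, clear buffer)
def pvFlushRegular (result current_regular : List (List Char)) : List (List Char) :=
  if current_regular.isEmpty then result else result ++ [pvFontSpan COLOR_BLACK current_regular.flatten]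

def pvFlushIrregular (result current_irregular : List (List Char)) : List (List Char) :=
  if current_irregular.isEmpty then result else result ++ [pvFontSpan COLOR_DARK_RED current_irregular.flatten]

-- the per-character classification both Pythons compute (A inline in its loop, B in _classify)
def pvClsFun (chars : List Char) (ic : Int × Char) : List Char × Bool :=
  let i := ic.1
  let char := ic.2
  let part_of_sie := is_formal_sie_start chars i || (decide (0 < i) && is_formal_sie_start chars (i - 1))
                       || (decide (1 < i) && is_formal_sie_start chars (i - 2))
  let is_regular := PySem.Chars.islower char || !PySem.Chars.isalpha char || part_of_sie
  let canonical := escape_xml (if part_of_sie then [char] else PySem.Chars.lower [char])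
  (canonical, is_regular)

def mixed_case_to_xml (text : String) : String :=
  let chars := text.toList
  let st := (PySem.List.enumerate chars).foldl
    (fun (st : List (List Char) × List (List Char) × List (List Char) × Bool) ic =>
      let result := st.1
      let current_regular := st.2.1
      let current_irregular := st.2.2.1
      let in_irregular := st.2.2.2
      let p := pvClsFun chars ic     -- part_of_sie / is_regular / canonical, as in the Python body
      if p.2 then
        if in_irregular then
          (pvFlushIrregular result current_irregular, current_regular ++ [p.1], ([] : List (List Char)), false)
        else
          (result, current_regular ++ [p.1], current_irregular, in_irregular)
      else
        if !in_irregular then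
          (pvFlushRegular result current_regular, ([] : List (List Char)), current_irregular ++ [p.1], true)
        else
          (result, current_regular, current_irregular ++ [p.1], in_irregular))
    (([] : List (List Char)), ([] : List (List Char)), ([] : List (List Char)), false)
  let result := pvFlushRegular st.1 st.2.1
  let result := pvFlushIrregular result st.2.2.1
  String.ofList result.flatten

-- ===== PORT B =====
-- phase 1: _classify
def pvClassify (chars : List Char) : List (List Char × Bool) :=
  (PySem.List.enumerate chars).map (pvClsFun chars)

-- phase 2: extract maximal runs of equal flag (the two index pointers i..j of Source B, structurally)
def pvGroupRuns : List (List Char × Bool) → List (Bool × List (List Char))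
  | [] => []
  | (s, k) :: rest =>
      (k, s :: (rest.takeWhile (fun p => p.2 == k)).map (·.1)) ::
        pvGroupRuns (rest.dropWhile (fun p => p.2 == k))
  termination_by l => l.length
  decreasing_by
    have := List.length_dropWhile_le (p := fun p => p.2 == k) (l := rest)
    simp
    omega

def mixed_case_to_xml_alt (text : String) : String :=
  let pairs := pvClassify text.toList
  String.ofList (((pvGroupRuns pairs).map
    (fun g => pvFontSpan (if g.1 then COLOR_BLACK else COLOR_DARK_RED) g.2.flatten)).flatten)

-- ===== PRECONDITION & SPEC =====
def Spec_mixed_case_to_xml (text : String) (out : String) : Prop := out = mixed_case_to_xml_alt text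
instance (text : String) (out : String) : Decidable (Spec_mixed_case_to_xml text out) := by unfold Spec_mixed_case_to_xml; infer_instance

-- ===== CLAIM (what is proved, stated in full; the proofs are below) =====
def Claim_equal_mixed_case_to_xml : Prop := ∀ (text : String), Dom_mixed_case_to_xml text → Spec_mixed_case_to_xml text (mixed_case_to_xml text)

-- ===== LEMMAS AND PROOFS =====

-- A's loop body as a step function on the classified pair
def pvStepA (st : List (List Char) × List (List Char) × List (List Char) × Bool)
    (p : List Char × Bool) : List (List Char) × List (List Char) × List (List Char) × Bool :=
  if p.2 then
    if st.2.2.2 then (pvFlushIrregular st.1 st.2.2.1, st.2.1 ++ [p.1], [], false)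
    else (st.1, st.2.1 ++ [p.1], st.2.2.1, st.2.2.2)
  else
    if !st.2.2.2 then (pvFlushRegular st.1 st.2.1, [], st.2.2.1 ++ [p.1], true)
    else (st.1, st.2.1, st.2.2.1 ++ [p.1], st.2.2.2)

-- A's final flushes + join
def pvFinish (st : List (List Char) × List (List Char) × List (List Char) × Bool) : List Char :=
  (pvFlushIrregular (pvFlushRegular st.1 st.2.1) st.2.2.1).flatten

-- rendering of B's groups
def pvRender (gs : List (Bool × List (List Char))) : List Char :=
  (gs.map (fun g => pvFontSpan (if g.1 then COLOR_BLACK else COLOR_DARK_RED) g.2.flatten)).flatten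

-- prepend a pending run of key k (empty = nothing pending), merging with a leading group of the same key
def pvPrepend (k : Bool) (cur : List (List Char)) :
    List (Bool × List (List Char)) → List (Bool × List (List Char))
  | gs => if cur.isEmpty then gs
          else match gs with
               | (k', g) :: rest => if k = k' then (k, cur ++ g) :: rest else (k, cur) :: (k', g) :: rest
               | [] => [(k, cur)]

lemma pvPrepend_nil_run (k : Bool) (gs : List (Bool × List (List Char))) :
    pvPrepend k [] gs = gs := by simp [pvPrepend]

lemma pvGroupRuns_nil : pvGroupRuns [] = [] := by
  rw [pvGroupRuns]

lemma pvGroupRuns_cons (s : List Char) (k : Bool) (rest : List (List Char × Bool)) :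
    pvGroupRuns ((s, k) :: rest) =
      (k, s :: (rest.takeWhile (fun p => p.2 == k)).map (·.1)) ::
        pvGroupRuns (rest.dropWhile (fun p => p.2 == k)) := by
  rw [pvGroupRuns]

lemma pvPrepend_groupRuns (k : Bool) (cur : List (List Char)) (s : List Char)
    (cls : List (List Char × Bool)) :
    pvPrepend k cur (pvGroupRuns ((s, k) :: cls)) = pvPrepend k (cur ++ [s]) (pvGroupRuns cls) := by
  cases cls with
  | nil =>
      cases cur <;> simp [pvGroupRuns_cons, pvGroupRuns_nil, pvPrepend]
  | cons q cls' =>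
      obtain ⟨s2, k2⟩ := q
      by_cases hk : k2 = k
      · subst hk
        cases cur <;> simp [pvGroupRuns_cons, pvPrepend]
      · have hk' : (k2 == k) = false := by simp [hk]
        cases cur <;> simp [pvGroupRuns_cons, pvPrepend, hk', Ne.symm hk]

lemma pvRender_cons (g : Bool × List (List Char)) (gs : List (Bool × List (List Char))) :
    pvRender (g :: gs) = pvFontSpan (if g.1 then COLOR_BLACK else COLOR_DARK_RED) g.2.flatten ++ pvRender gs := by
  simp [pvRender]

lemma pvLoop_eq (cls : List (List Char × Bool)) :
    ∀ (result curR curI : List (List Char)) (inI : Bool),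
      (if inI then curR = [] else curI = []) →
      pvFinish (cls.foldl pvStepA (result, curR, curI, inI)) =
        result.flatten ++ pvRender (pvPrepend (!inI) (if inI then curI else curR) (pvGroupRuns cls)) := by
  induction cls with
  | nil =>
      intro result curR curI inI hinv
      cases inI
      · simp at hinv; subst hinv
        by_cases h : curR = [] <;>
          simp [pvFinish, pvFlushRegular, pvFlushIrregular, pvPrepend, pvRender, pvGroupRuns_nil, h]
      · simp at hinv; subst hinv
        by_cases h : curI = [] <;>
          simp [pvFinish, pvFlushRegular, pvFlushIrregular, pvPrepend, pvRender, pvGroupRuns_nil, h]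
  | cons p cls ih =>
      intro result curR curI inI hinv
      obtain ⟨s, b⟩ := p
      cases b
      · -- irregular character
        cases inI
        · -- was in a regular run: flush it, start irregular run [s]
          simp at hinv; subst hinv
          rw [List.foldl_cons,
            show pvStepA (result, curR, [], false) (s, false)
                = (pvFlushRegular result curR, [], [s], true) by simp [pvStepA],
            ih _ _ _ _ (by simp)]
          simp only [Bool.not_true, Bool.not_false, Bool.false_eq_true, if_false, if_true]
          have hM := pvPrepend_groupRuns false [] s cls
          rw [pvPrepend_nil_run, List.nil_append] at hM
          rw [← hM]
          by_cases h : curR = []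
          · simp [h, pvFlushRegular, pvPrepend_nil_run]
          · rw [pvGroupRuns_cons]
            simp [pvPrepend, pvFlushRegular, h, pvRender_cons]
        · -- already in an irregular run: extend it
          simp at hinv; subst hinv
          rw [List.foldl_cons,
            show pvStepA (result, [], curI, true) (s, false)
                = (result, [], curI ++ [s], true) by simp [pvStepA],
            ih _ _ _ _ (by simp)]
          simp only [Bool.not_true, if_true]
          rw [pvPrepend_groupRuns false curI s cls]
      · -- regular character
        cases inI
        · -- already in a regular run: extend it
          simp at hinv; subst hinv
          rw [List.foldl_cons,
            show pvStepA (result, curR, [], false) (s, true)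
                = (result, curR ++ [s], [], false) by simp [pvStepA],
            ih _ _ _ _ (by simp)]
          simp only [Bool.not_false, Bool.false_eq_true, if_false]
          rw [pvPrepend_groupRuns true curR s cls]
        · -- was in an irregular run: flush it, start regular run [s]
          simp at hinv; subst hinv
          rw [List.foldl_cons,
            show pvStepA (result, [], curI, true) (s, true)
                = (pvFlushIrregular result curI, [s], [], false) by simp [pvStepA],
            ih _ _ _ _ (by simp)]
          simp only [Bool.not_true, Bool.not_false, Bool.false_eq_true, if_false, if_true]
          have hM := pvPrepend_groupRuns true [] s cls
          rw [pvPrepend_nil_run, List.nil_append] at hM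
          rw [← hM]
          by_cases h : curI = []
          · simp [h, pvFlushIrregular, pvPrepend_nil_run]
          · rw [pvGroupRuns_cons]
            simp [pvPrepend, pvFlushIrregular, h, pvRender_cons]

lemma pvA_eq (text : String) :
    mixed_case_to_xml text
      = String.ofList (pvFinish ((pvClassify text.toList).foldl pvStepA ([], [], [], false))) := by
  simp only [mixed_case_to_xml, pvClassify, pvFinish, List.foldl_map]
  rfl

lemma pvB_eq (text : String) :
    mixed_case_to_xml_alt text = String.ofList (pvRender (pvGroupRuns (pvClassify text.toList))) := by
  rfl

-- ===== VERDICT (by name: the statement is the Claim_ definition above) =====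
theorem mixed_case_to_xml_spec : Claim_equal_mixed_case_to_xml := by
  intro text _
  unfold Spec_mixed_case_to_xml
  rw [pvA_eq, pvB_eq]
  rw [pvLoop_eq (pvClassify text.toList) [] [] [] false (by simp)]
  simp [pvPrepend_nil_run]
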